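-- pv_equiv track=rewrite | github.com/sergiorgiraldo/Python-lang | data-engineering-interview-patterns/patterns/02_two_pointers/de_scenarios/data_compaction.py | compact_naive
-- ===== SOURCE A (Python) =====
-- def compact_naive(
--     records: list[dict],
--     key: str = "id",
--     status_field: str = "status",
--     deleted_value: str = "deleted",
-- ) -> list[dict]:
--     """
--     Naive approach: filter, then deduplicate as separate steps.
--     Creates new lists at each step.
--
--     Time: O(n)  Space: O(n) - creates multiple intermediate copies
--     """
--     # Step 1: filter deleted
--     active = [r for r in records if r.get(status_field) != deleted_value]
--
--     # Step 2: deduplicate (sorted assumption)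
--     if not active:
--         return active
--
--     deduped = [active[0]]
--     for i in range(1, len(active)):
--         if active[i][key] != active[i - 1][key]:
--             deduped.append(active[i])
--
--     return deduped
-- ===== SOURCE B (Python) =====
-- def compact_naive(
--     records: list[dict],
--     key: str = "id",
--     status_field: str = "status",
--     deleted_value: str = "deleted",
-- ) -> list[dict]:
--     """Right-to-left scan with deferred emission: walk records in reverse,
--     holding the most recent active record seen; when an earlier active record
--     appears, emit the held one only if their keys differ; finally emit the held
--     record (the first active) unconditionally, then reverse the output."""
--     out = []
--     held = None
--     for r in reversed(records):
--         if r.get(status_field) == deleted_value: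
--             continue
--         if held is not None and held[key] != r[key]:
--             out.append(held)
--         held = r
--     if held is not None:
--         out.append(held)
--     out.reverse()
--     return out
-- ===== Notes on version B (the rewrite author's own statement) =====
-- stated objective: alternative
-- what changed: Replaces A's two staged passes (filter comprehension, then index-based adjacent dedup over the intermediate list) with a single right-to-left scan that defers the keep/drop decision for each active record until the preceding active record is seen, building the output back-to-front and reversing it once at the end.
import Mathlib
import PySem

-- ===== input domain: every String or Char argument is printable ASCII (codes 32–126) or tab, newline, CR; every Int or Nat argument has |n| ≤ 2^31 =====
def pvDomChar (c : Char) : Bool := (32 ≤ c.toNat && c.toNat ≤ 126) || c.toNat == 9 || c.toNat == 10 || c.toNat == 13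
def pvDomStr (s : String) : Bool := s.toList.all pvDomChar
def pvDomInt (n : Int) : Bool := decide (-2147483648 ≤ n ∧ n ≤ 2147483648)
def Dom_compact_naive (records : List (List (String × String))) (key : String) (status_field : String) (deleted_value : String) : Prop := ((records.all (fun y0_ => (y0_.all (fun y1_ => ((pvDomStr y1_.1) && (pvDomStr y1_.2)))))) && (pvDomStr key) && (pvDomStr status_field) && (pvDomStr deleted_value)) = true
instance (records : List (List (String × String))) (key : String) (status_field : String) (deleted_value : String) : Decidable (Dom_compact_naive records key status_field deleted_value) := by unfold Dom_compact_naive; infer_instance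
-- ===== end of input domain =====

-- B replaces A's two forward passes by one right-to-left scan with deferred emission (objective: alternative, same cost).

-- ===== PORT A =====
-- A: filter deleted, then dedup by index loop over the intermediate `active` list.
def compact_naive (records : List (List (String × String))) (key : String) (status_field : String) (deleted_value : String) : List (List (String × String)) :=
  let active := records.filter (fun r => !((PySem.Dict.mk r).get? status_field == some deleted_value))
  if active = [] then active
  else
    (PySem.List.pyRange 1 active.length 1).foldl
      (fun deduped i =>
        if (PySem.Dict.mk (PySem.List.pyGetD active i [])).get? key ≠
           (PySem.Dict.mk (PySem.List.pyGetD active (i - 1) [])).get? key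
        then deduped ++ [PySem.List.pyGetD active i []]
        else deduped)
      [PySem.List.pyGetD active 0 []]

-- ===== PORT B =====
-- B: one reverse scan, state = (output built back-to-front, held active record or none); reverse at the end.
def compact_naive_alt (records : List (List (String × String))) (key : String) (status_field : String) (deleted_value : String) : List (List (String × String)) :=
  let s := records.reverse.foldl
    (fun (s : List (List (String × String)) × Option (List (String × String))) r =>
      if (PySem.Dict.mk r).get? status_field == some deleted_value then s
      else
        ((match s.2 with
          | none => s.1
          | some h =>
            if (PySem.Dict.mk h).get? key ≠ (PySem.Dict.mk r).get? key then s.1 ++ [h] else s.1),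
         some r))
    ([], none)
  (match s.2 with
   | none => s.1
   | some h => s.1 ++ [h]).reverse

-- ===== PRECONDITION & SPEC =====
-- Pre_ excludes exactly the inputs on which Python A raises KeyError: two or more
-- records survive the status filter and some surviving record lacks `key` (B raises there too).
def Pre_compact_naive (records : List (List (String × String))) (key : String) (status_field : String) (deleted_value : String) : Prop :=
  (records.filter (fun r => !((PySem.Dict.mk r).get? status_field == some deleted_value))).length ≤ 1 ∨
  ∀ r ∈ records.filter (fun r => !((PySem.Dict.mk r).get? status_field == some deleted_value)),
    (PySem.Dict.mk r).contains key = true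
instance (records : List (List (String × String))) (key : String) (status_field : String) (deleted_value : String) : Decidable (Pre_compact_naive records key status_field deleted_value) := by unfold Pre_compact_naive; infer_instance

def pvWitness_compact_naive : (List (List (String × String))) × String × String × String :=
  ([[("id", "1"), ("status", "active")], [("id", "1"), ("status", "deleted")], [("id", "2")]], "id", "status", "deleted")

def Spec_compact_naive (records : List (List (String × String))) (key : String) (status_field : String) (deleted_value : String) (out : List (List (String × String))) : Prop := out = compact_naive_alt records key status_field deleted_value
instance (records : List (List (String × String))) (key : String) (status_field : String) (deleted_value : String) (out : List (List (String × String))) : Decidable (Spec_compact_naive records key status_field deleted_value out) := by unfold Spec_compact_naive; infer_instance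

-- ===== CLAIM (what is proved, stated in full; the proofs are below) =====
def Claim_equal_compact_naive : Prop := ∀ (records : List (List (String × String))) (key : String) (status_field : String) (deleted_value : String), Dom_compact_naive records key status_field deleted_value → Pre_compact_naive records key status_field deleted_value → Spec_compact_naive records key status_field deleted_value (compact_naive records key status_field deleted_value)

-- ===== LEMMAS AND PROOFS =====

-- Named copy of B's loop body after the status test (equal to the inline lambda by funext below).
def pvStepB (key : String) (s : List (List (String × String)) × Option (List (String × String))) (r : List (String × String)) : List (List (String × String)) × Option (List (String × String)) :=
  ((match s.2 with
    | none => s.1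
    | some h =>
      if (PySem.Dict.mk h).get? key ≠ (PySem.Dict.mk r).get? key then s.1 ++ [h] else s.1),
   some r)

-- Shared characterisation: after the first active record p, a record is kept iff
-- its key differs from the immediately preceding active record.
def pvGo (key : String) (p : List (String × String)) : List (List (String × String)) → List (List (String × String))
  | [] => []
  | r :: t =>
    (if (PySem.Dict.mk r).get? key ≠ (PySem.Dict.mk p).get? key then [r] else []) ++ pvGo key r t

-- A's dedup loop computes pvGo.
theorem pvGoA (key : String) :
    ∀ (l : List (List (String × String))) (p : List (String × String)) (acc : List (List (String × String))),
    (List.range l.length).foldl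
      (fun dd k =>
        if (PySem.Dict.mk (l.getD k [])).get? key ≠ (PySem.Dict.mk ((p :: l).getD k [])).get? key
        then dd ++ [l.getD k []] else dd) acc = acc ++ pvGo key p l := by
  intro l
  induction l with
  | nil => intro p acc; simp [pvGo]
  | cons r t ih =>
    intro p acc
    rw [List.length_cons, List.range_succ_eq_map, List.foldl_cons, List.foldl_map]
    simp only [List.getD_cons_succ, List.getD_cons_zero]
    rw [ih r]
    by_cases h : (PySem.Dict.mk r).get? key ≠ (PySem.Dict.mk p).get? key <;>
      simp [pvGo, h, List.append_assoc]

-- B's reverse scan, seen as a foldr over the active list, computes pvGo reversed.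
theorem pvGoB (key : String) :
    ∀ (t : List (List (String × String))) (h : List (String × String)),
    (h :: t).foldr (fun r s => pvStepB key s r) ([], none) = ((pvGo key h t).reverse, some h) := by
  intro t
  induction t with
  | nil => intro h; simp [pvStepB, pvGo]
  | cons h2 t2 ih =>
    intro h
    rw [show (h :: h2 :: t2).foldr (fun r s => pvStepB key s r) ([], none) =
        pvStepB key ((h2 :: t2).foldr (fun r s => pvStepB key s r) ([], none)) h from rfl, ih h2]
    by_cases hc : (PySem.Dict.mk h2).get? key ≠ (PySem.Dict.mk h).get? key <;>
      simp [pvStepB, pvGo, hc]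

-- ===== VERDICT (by name: the statement is the Claim_ definition above) =====
theorem compact_naive_spec : Claim_equal_compact_naive := by
  intro records key status_field deleted_value _ _
  unfold Spec_compact_naive compact_naive compact_naive_alt
  rw [show (fun (s : List (List (String × String)) × Option (List (String × String))) r =>
        if (PySem.Dict.mk r).get? status_field == some deleted_value then s
        else
          ((match s.2 with
            | none => s.1
            | some h =>
              if (PySem.Dict.mk h).get? key ≠ (PySem.Dict.mk r).get? key then s.1 ++ [h] else s.1),
           some r)) =
      (fun s r =>
        if !((PySem.Dict.mk r).get? status_field == some deleted_value) then pvStepB key s r else s) from by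
      funext s r
      by_cases h : (PySem.Dict.mk r).get? status_field == some deleted_value <;> simp [h, pvStepB]]
  rw [PySem.List.foldl_if_eq_foldl_filter, List.filter_reverse, List.foldl_reverse]
  cases hact : records.filter (fun r => !((PySem.Dict.mk r).get? status_field == some deleted_value)) with
  | nil => simp
  | cons h t =>
    -- B side
    rw [pvGoB key t h]
    simp only [if_neg (List.cons_ne_nil h t), List.reverse_append, List.reverse_reverse,
      List.reverse_cons, List.reverse_nil, List.nil_append, List.singleton_append]
    -- A side: convert the pyRange fold to a List.range fold, then apply pvGoA
    have hr : PySem.List.pyRange 1 ((h :: t).length : Int) 1 =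
        (List.range t.length).map (fun k : Nat => (1 : Int) + (k : Int)) := by
      rw [PySem.List.pyRange_one]
      congr 1
      simp
    rw [hr, List.foldl_map]
    have hidx : ∀ (k : Nat),
        PySem.List.pyGetD (h :: t) ((1 : Int) + k) ([] : List (String × String)) = t.getD k [] ∧
        PySem.List.pyGetD (h :: t) ((1 : Int) + k - 1) ([] : List (String × String)) = (h :: t).getD k [] := by
      intro k
      constructor
      · have : (1 : Int) + k = ((k + 1 : Nat) : Int) := by push_cast; ring
        rw [this, PySem.List.pyGetD_natCast]
        simp
      · have : (1 : Int) + k - 1 = ((k : Nat) : Int) := by ring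
        rw [this, PySem.List.pyGetD_natCast]
    have h0 : PySem.List.pyGetD (h :: t) (0 : Int) ([] : List (String × String)) = h := by
      simp [PySem.List.pyGetD, PySem.List.pyGet?, PySem.List.pyIdx?]
    have hcongr : (List.range t.length).foldl
        (fun dd (k : Nat) =>
          if (PySem.Dict.mk (PySem.List.pyGetD (h :: t) ((1 : Int) + k) [])).get? key ≠
             (PySem.Dict.mk (PySem.List.pyGetD (h :: t) ((1 : Int) + k - 1) [])).get? key
          then dd ++ [PySem.List.pyGetD (h :: t) ((1 : Int) + k) []] else dd)
        [PySem.List.pyGetD (h :: t) 0 []] =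
        (List.range t.length).foldl
        (fun dd k =>
          if (PySem.Dict.mk (t.getD k [])).get? key ≠ (PySem.Dict.mk ((h :: t).getD k [])).get? key
          then dd ++ [t.getD k []] else dd) [h] := by
      rw [h0]
      apply PySem.List.foldl_congr_mem
      intro acc k _
      rw [(hidx k).1, (hidx k).2]
    rw [hcongr, pvGoA]
    simp
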